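-- pv_equiv track=rewrite | github.com/MrBrantCode/unitest_baseline | mut_generate/mist_train_cf/cf_64936/solution.py | merge_reversed_strings
-- ===== SOURCE A (Python) =====
-- def merge_reversed_strings(s1, s2):
--     # Reverse both strings
--     s1 = s1[::-1]
--     s2 = s2[::-1]
--     # Initialize an empty list to store the result
--     res = []
--     # Loop through each pair of characters
--     for char1, char2 in zip(s1, s2):
--         # Append the characters to the result list
--         res.append(char1)
--         res.append(char2)
--     # Check for remaining characters in the longer string
--     if len(s1) < len(s2):
--         # Append the remaining characters from s2
--         res.extend(list(s2[len(s1):]))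
--     else:
--         # Append the remaining characters from s1
--         res.extend(list(s1[len(s2):]))
--     # Convert the list back into a string and return the result
--     return "".join(res)
-- ===== SOURCE B (Python) =====
-- def merge_reversed_strings(s1, s2):
--     # Two descending index pointers walk the ORIGINAL strings from the end;
--     # no reversed copies are ever built.
--     out = []
--     i, j = len(s1) - 1, len(s2) - 1
--     while i >= 0 and j >= 0:
--         out.append(s1[i])
--         out.append(s2[j])
--         i -= 1
--         j -= 1
--     while i >= 0:
--         out.append(s1[i])
--         i -= 1
--     while j >= 0:
--         out.append(s2[j])
--         j -= 1
--     return "".join(out)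
-- ===== Notes on version B (the rewrite author's own statement) =====
-- stated objective: alternative
-- what changed: B never materializes the reversed strings: two descending index pointers walk the original strings from the end (paired while-loop, then two leftover while-loops), replacing A's reverse-both + zip + length-compared tail slice.
import Mathlib
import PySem

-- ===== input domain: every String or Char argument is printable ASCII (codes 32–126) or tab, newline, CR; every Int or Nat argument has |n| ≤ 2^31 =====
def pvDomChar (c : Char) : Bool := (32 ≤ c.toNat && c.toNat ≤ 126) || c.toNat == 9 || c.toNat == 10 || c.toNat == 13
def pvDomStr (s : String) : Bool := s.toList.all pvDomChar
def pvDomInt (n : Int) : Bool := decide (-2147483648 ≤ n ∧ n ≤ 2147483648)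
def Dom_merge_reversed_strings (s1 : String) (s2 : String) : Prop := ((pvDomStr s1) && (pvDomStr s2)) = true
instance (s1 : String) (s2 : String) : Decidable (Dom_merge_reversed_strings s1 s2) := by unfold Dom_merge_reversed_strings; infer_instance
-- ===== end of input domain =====

-- B never builds the reversed strings: two descending index pointers walk the original
-- strings from the end, replacing A's reverse-both + zip + tail-slice structure.

-- ===== PORT A =====
def merge_reversed_strings (s1 : String) (s2 : String) : String :=
  -- s1 = s1[::-1]; s2 = s2[::-1]
  let r1 : List Char := ((PySem.Str.slice? s1 none none (-1)).getD "").toList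
  let r2 : List Char := ((PySem.Str.slice? s2 none none (-1)).getD "").toList
  -- res = []; for char1, char2 in zip(s1, s2): res.append(char1); res.append(char2)
  let res : List Char := (r1.zip r2).foldl (fun acc p => acc ++ [p.1, p.2]) []
  -- if len(s1) < len(s2): res.extend(list(s2[len(s1):])) else: res.extend(list(s1[len(s2):]))
  let res : List Char :=
    if r1.length < r2.length then res ++ PySem.List.slice r2 (some (r1.length : Int)) none
    else res ++ PySem.List.slice r1 (some (r2.length : Int)) none
  -- return "".join(res)
  String.ofList res

-- ===== PORT B =====
-- while i >= 0 and j >= 0: out += [s1[i], s2[j]]; i -= 1; j -= 1   (returns final i, j, out)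
def bPairLoop (l1 l2 : List Char) (i j : Int) (out : List Char) : Int × Int × List Char :=
  if h : 0 ≤ i ∧ 0 ≤ j then
    bPairLoop l1 l2 (i - 1) (j - 1)
      (out ++ [PySem.List.pyGetD l1 i ' ', PySem.List.pyGetD l2 j ' '])
  else (i, j, out)
termination_by (i + 1).toNat
decreasing_by omega

-- while i >= 0: out.append(l[i]); i -= 1
def bRestLoop (l : List Char) (i : Int) (out : List Char) : List Char :=
  if h : 0 ≤ i then bRestLoop l (i - 1) (out ++ [PySem.List.pyGetD l i ' ']) else out
termination_by (i + 1).toNat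
decreasing_by omega

def merge_reversed_strings_alt (s1 : String) (s2 : String) : String :=
  let l1 := s1.toList
  let l2 := s2.toList
  -- out = []; i, j = len(s1)-1, len(s2)-1
  let r := bPairLoop l1 l2 ((l1.length : Int) - 1) ((l2.length : Int) - 1) []
  let out := bRestLoop l1 r.1 r.2.2
  let out := bRestLoop l2 r.2.1 out
  -- return "".join(out)
  String.ofList out

-- ===== PRECONDITION & SPEC =====
def Spec_merge_reversed_strings (s1 : String) (s2 : String) (out : String) : Prop := out = merge_reversed_strings_alt s1 s2
instance (s1 : String) (s2 : String) (out : String) : Decidable (Spec_merge_reversed_strings s1 s2 out) := by unfold Spec_merge_reversed_strings; infer_instance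

-- ===== CLAIM (what is proved, stated in full; the proofs are below) =====
def Claim_equal_merge_reversed_strings : Prop := ∀ (s1 : String) (s2 : String), Dom_merge_reversed_strings s1 s2 → Spec_merge_reversed_strings s1 s2 (merge_reversed_strings s1 s2)

-- ===== LEMMAS AND PROOFS =====

-- the common interleaving both programs compute (on the reversed lists)
def itl : List Char → List Char → List Char
  | [], ys => ys
  | x :: xs, [] => x :: xs
  | x :: xs, y :: ys => x :: y :: itl xs ys

-- A's zip phase + tail equals itl
theorem a_eq_itl (l1 l2 : List Char) :
    (l1.zip l2).flatMap (fun p => [p.1, p.2]) ++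
      (if l1.length < l2.length then l2.drop l1.length else l1.drop l2.length) = itl l1 l2 := by
  induction l1 generalizing l2 with
  | nil => cases l2 <;> simp [itl]
  | cons x xs ih =>
    cases l2 with
    | nil => simp [itl]
    | cons y ys => simpa [itl] using ih ys

theorem take_succ_reverse (l : List Char) (n : Nat) (h : n < l.length) :
    (l.take (n + 1)).reverse = l.getD n ' ' :: (l.take n).reverse := by
  rw [List.take_succ]
  simp [List.getElem?_eq_getElem h, List.getD, List.getElem?_eq_getElem h]

theorem pyGetD_nonneg (l : List Char) (i : Int) (h : 0 ≤ i) :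
    PySem.List.pyGetD l i ' ' = l.getD i.toNat ' ' := by
  exact PySem.List.pyGetD_of_nonneg l ' ' h

-- the tail loop appends l[i], l[i-1], …, l[0]
theorem bRestLoop_eq (l : List Char) (i : Int) (out : List Char) (hi : i < (l.length : Int)) :
    bRestLoop l i out = out ++ (l.take (i + 1).toNat).reverse := by
  by_cases h : 0 ≤ i
  · have hn : (i + 1).toNat = i.toNat + 1 := by omega
    rw [bRestLoop, dif_pos h, bRestLoop_eq l (i - 1) _ (by omega), hn,
      take_succ_reverse l i.toNat (by omega), pyGetD_nonneg l i h]
    have : (i - 1 + 1).toNat = i.toNat := by omega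
    rw [this]
    simp
  · rw [bRestLoop, dif_neg h]
    have : (i + 1).toNat = 0 := by omega
    simp [this]
termination_by (i + 1).toNat
decreasing_by omega

-- the paired loop consumes min(i+1, j+1) characters from the ends of both lists
theorem bPairLoop_eq (l1 l2 : List Char) (i j : Int) (out : List Char)
    (h1 : i < (l1.length : Int)) (h2 : j < (l2.length : Int)) :
    bPairLoop l1 l2 i j out =
      (i - min (i + 1).toNat (j + 1).toNat, j - min (i + 1).toNat (j + 1).toNat,
       out ++ ((l1.take (i + 1).toNat).reverse.zip (l2.take (j + 1).toNat).reverse).flatMap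
         (fun p => [p.1, p.2])) := by
  by_cases h : 0 ≤ i ∧ 0 ≤ j
  · obtain ⟨hi, hj⟩ := h
    have hn1 : (i + 1).toNat = i.toNat + 1 := by omega
    have hn2 : (j + 1).toNat = j.toNat + 1 := by omega
    rw [bPairLoop, dif_pos ⟨hi, hj⟩, bPairLoop_eq l1 l2 (i - 1) (j - 1) _ (by omega) (by omega)]
    have e1 : (i - 1 + 1).toNat = i.toNat := by omega
    have e2 : (j - 1 + 1).toNat = j.toNat := by omega
    rw [e1, e2, hn1, hn2, take_succ_reverse l1 i.toNat (by omega),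
      take_succ_reverse l2 j.toNat (by omega), pyGetD_nonneg l1 i hi, pyGetD_nonneg l2 j hj]
    refine Prod.ext (by simp; omega) (Prod.ext (by simp; omega) ?_)
    simp [List.zip_cons_cons]
  · rw [bPairLoop, dif_neg h]
    have : (i + 1).toNat = 0 ∨ (j + 1).toNat = 0 := by omega
    rcases this with h0 | h0 <;> simp [h0] <;> omega
termination_by (i + 1).toNat
decreasing_by omega

theorem reverse_take_drop (l : List Char) (n : Nat) :
    (l.take (l.length - n)).reverse = l.reverse.drop n := by
  by_cases h : n ≤ l.length
  · rw [List.reverse_take]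
    congr 1
    omega
  · have h0 : l.length - n = 0 := by omega
    rw [h0, List.drop_of_length_le (by simp; omega)]
    simp

-- B on the underlying lists computes itl of the reverses
theorem b_core (l1 l2 : List Char) :
    (let r := bPairLoop l1 l2 ((l1.length : Int) - 1) ((l2.length : Int) - 1) []
     bRestLoop l2 r.2.1 (bRestLoop l1 r.1 r.2.2)) = itl l1.reverse l2.reverse := by
  have e1 : ((l1.length : Int) - 1 + 1).toNat = l1.length := by omega
  have e2 : ((l2.length : Int) - 1 + 1).toNat = l2.length := by omega
  rw [bPairLoop_eq l1 l2 _ _ [] (by omega) (by omega), e1, e2]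
  simp only [List.take_length]
  set m : Nat := min l1.length l2.length with hm
  have hmin : m ≤ l1.length ∧ m ≤ l2.length := by constructor <;> omega
  rw [bRestLoop_eq l1 _ _ (by omega), bRestLoop_eq l2 _ _ (by omega)]
  have f1 : ((l1.length : Int) - 1 - m + 1).toNat = l1.length - m := by omega
  have f2 : ((l2.length : Int) - 1 - m + 1).toNat = l2.length - m := by omega
  rw [f1, f2, reverse_take_drop, reverse_take_drop, ← a_eq_itl l1.reverse l2.reverse]
  simp only [List.nil_append, List.length_reverse, List.append_assoc]
  congr 1
  by_cases hlt : l1.length < l2.length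
  · have : l1.length - m = 0 := by omega
    have hm1 : m = l1.length := by omega
    simp [hlt, this, hm1]
  · have : l2.length - m = 0 := by omega
    have hm2 : m = l2.length := by omega
    simp [hlt, this, hm2]

-- ===== VERDICT (by name: the statement is the Claim_ definition above) =====
theorem merge_reversed_strings_spec : Claim_equal_merge_reversed_strings := by
  intro s1 s2 _
  unfold Spec_merge_reversed_strings merge_reversed_strings merge_reversed_strings_alt
  simp only [PySem.Str.slice?_none_none_neg_one, Option.getD_some, String.toList_ofList]
  refine congrArg String.ofList ?_
  rw [b_core s1.toList s2.toList, ← a_eq_itl s1.toList.reverse s2.toList.reverse,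
    PySem.List.slice_from_natCast, PySem.List.slice_from_natCast,
    PySem.List.foldl_append_eq_flatMap]
  simp only [List.nil_append, List.length_reverse]
  split_ifs <;> rfl
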